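-- pv_equiv track=rewrite | github.com/tjohnsonII/freePBX_Tools | webscraper/src/webscraper/ticket_api/auth.py | domain_matches_selected
-- ===== SOURCE A (Python) =====
-- def _normalize_domain(domain: str) -> str:
--     return str(domain or "").strip().lstrip(".").lower()
--
-- def domain_matches_selected(cookie_domain: str, selected_domains: list[str]) -> bool:
--     domain = _normalize_domain(cookie_domain)
--     if not domain:
--         return False
--     for selected in selected_domains:
--         target = _normalize_domain(selected)
--         if domain == target or domain.endswith(f".{target}"):
--             return True
--     return False
-- ===== SOURCE B (Python) =====
-- def _norm(domain: str) -> str: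
--     return str(domain or "").strip().lstrip(".").lower()
--
-- def domain_matches_selected(cookie_domain: str, selected_domains: list[str]) -> bool:
--     domain = _norm(cookie_domain)
--     if not domain:
--         return False
--     # precompute every acceptable match target: the domain itself plus the
--     # substring after each dot (the endswith(".<target>") suffixes)
--     targets = {domain}
--     for i, ch in enumerate(domain):
--         if ch == ".":
--             targets.add(domain[i + 1:])
--     return any(_norm(s) in targets for s in selected_domains)
-- ===== Notes on version B (the rewrite author's own statement) =====
-- stated objective: alternative
-- what changed: B precomputes the set of all acceptable match targets (the normalized domain plus the substring after each dot) once and replaces A's per-selected equality/endswith scan with a set-membership lookup over the selected domains.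
import Mathlib
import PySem

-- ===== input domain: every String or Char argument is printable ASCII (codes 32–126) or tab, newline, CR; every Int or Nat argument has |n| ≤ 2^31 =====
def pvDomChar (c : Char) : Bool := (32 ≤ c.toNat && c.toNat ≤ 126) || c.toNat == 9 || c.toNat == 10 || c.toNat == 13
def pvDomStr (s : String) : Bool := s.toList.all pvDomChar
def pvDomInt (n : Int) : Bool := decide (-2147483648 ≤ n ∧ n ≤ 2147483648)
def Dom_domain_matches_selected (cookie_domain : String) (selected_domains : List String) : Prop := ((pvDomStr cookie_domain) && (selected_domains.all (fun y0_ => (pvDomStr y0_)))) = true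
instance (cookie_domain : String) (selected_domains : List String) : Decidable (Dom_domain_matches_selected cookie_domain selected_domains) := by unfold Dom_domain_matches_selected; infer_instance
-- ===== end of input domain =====

-- B replaces A's per-target endswith scans by one precomputed set of the domain's
-- dot-suffix match targets, turning the check for each selected domain into a set lookup (objective: alternative).

-- ===== PORT A =====
-- _normalize_domain: str(domain or "").strip().lstrip(".").lower()
-- ('domain or ""' is the identity on str input; lstrip(".") is dropWhile (· == '.'), exact:
--  it removes exactly the leading characters that are '.')
def pvNormalize (s : String) : List Char :=
  PySem.Chars.lower ((PySem.Chars.strip s.toList).dropWhile (fun c => c == '.'))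

def pvLoopA (domain : List Char) : List String → Bool
  | [] => false
  | selected :: rest =>
    let target := pvNormalize selected
    if domain == target || PySem.Chars.endswith domain ('.' :: target) then true
    else pvLoopA domain rest

def domain_matches_selected (cookie_domain : String) (selected_domains : List String) : Bool :=
  let domain := pvNormalize cookie_domain
  if domain.isEmpty then false
  else pvLoopA domain selected_domains

-- ===== PORT B =====
def domain_matches_selected_alt (cookie_domain : String) (selected_domains : List String) : Bool :=
  let domain := pvNormalize cookie_domain
  if domain.isEmpty then false
  else
    let targets : PySem.Set (List Char) :=
      (PySem.List.enumerate domain 0).foldl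
        (fun acc p =>
          if p.2 == '.' then PySem.Set.add acc (PySem.List.slice domain (some (p.1 + 1)) none)
          else acc)
        (PySem.Set.ofList [domain])
    selected_domains.any (fun s => PySem.Set.contains targets (pvNormalize s))

-- ===== PRECONDITION & SPEC =====
def Spec_domain_matches_selected (cookie_domain : String) (selected_domains : List String) (out : Bool) : Prop := out = domain_matches_selected_alt cookie_domain selected_domains
instance (cookie_domain : String) (selected_domains : List String) (out : Bool) : Decidable (Spec_domain_matches_selected cookie_domain selected_domains out) := by unfold Spec_domain_matches_selected; infer_instance

-- ===== CLAIM (what is proved, stated in full; the proofs are below) =====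
def Claim_equal_domain_matches_selected : Prop := ∀ (cookie_domain : String) (selected_domains : List String), Dom_domain_matches_selected cookie_domain selected_domains → Spec_domain_matches_selected cookie_domain selected_domains (domain_matches_selected cookie_domain selected_domains)

-- ===== LEMMAS AND PROOFS =====

-- ('.'::t) is a suffix of d iff t is the part of d after some dot.
theorem pv_endswith_iff (d t : List Char) :
    PySem.Chars.endswith d ('.' :: t) = true ↔
      ∃ k, ∃ _ : k < d.length, d[k] = '.' ∧ d.drop (k + 1) = t := by
  rw [PySem.Chars.endswith_iff]
  constructor
  · rintro ⟨pre, hpre⟩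
    refine ⟨pre.length, ?_, ?_, ?_⟩
    · subst hpre; simp
    · subst hpre; simp
    · subst hpre; simp [List.drop_append]
  · rintro ⟨k, hk, hdot, hdrop⟩
    refine ⟨d.take k, ?_⟩
    conv_rhs => rw [← List.take_append_drop k d]
    rw [List.drop_eq_getElem_cons hk, hdot, hdrop]

-- membership in the foldl-built target set
theorem pv_mem_foldl (d : List Char) (l : List (Int × Char)) (acc : PySem.Set (List Char))
    (t : List Char) :
    t ∈ l.foldl
        (fun acc p =>
          if p.2 == '.' then PySem.Set.add acc (PySem.List.slice d (some (p.1 + 1)) none)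
          else acc) acc ↔
      t ∈ acc ∨ ∃ p ∈ l, p.2 = '.' ∧ PySem.List.slice d (some (p.1 + 1)) none = t := by
  induction l generalizing acc with
  | nil => simp
  | cons p rest ih =>
    simp only [List.foldl_cons]
    by_cases h : p.2 = '.'
    · simp only [h, beq_self_eq_true, if_true, ih, PySem.Set.mem_add]
      constructor
      · rintro (⟨h1 | h1⟩ | ⟨q, hq, hq2, hq3⟩)
        · exact Or.inl h1
        · exact Or.inr ⟨p, by simp [h, h1]⟩
        · exact Or.inr ⟨q, by simp [hq], hq2, hq3⟩
      · rintro (h1 | ⟨q, hq, hq2, hq3⟩)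
        · exact Or.inl (Or.inl h1)
        · rcases List.mem_cons.mp hq with rfl | hq
          · exact Or.inl (Or.inr hq3.symm)
          · exact Or.inr ⟨q, hq, hq2, hq3⟩
    · rw [if_neg (by simp [h]), ih]
      constructor
      · rintro (h1 | ⟨q, hq, hq2, hq3⟩)
        · exact Or.inl h1
        · exact Or.inr ⟨q, by simp [hq], hq2, hq3⟩
      · rintro (h1 | ⟨q, hq, hq2, hq3⟩)
        · exact Or.inl h1
        · rcases List.mem_cons.mp hq with rfl | hq
          · exact absurd hq2 h
          · exact Or.inr ⟨q, hq, hq2, hq3⟩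

-- per-element agreement: A's test equals membership in B's target set
theorem pv_elem_eq (d t : List Char) :
    PySem.Set.contains
        ((PySem.List.enumerate d 0).foldl
          (fun acc p =>
            if p.2 == '.' then PySem.Set.add acc (PySem.List.slice d (some (p.1 + 1)) none)
            else acc)
          (PySem.Set.ofList [d])) t
      = (d == t || PySem.Chars.endswith d ('.' :: t)) := by
  rcases h : (d == t || PySem.Chars.endswith d ('.' :: t)) with _ | _
  · simp only [Bool.or_eq_false_iff, beq_eq_false_iff_ne] at h
    simp only [PySem.Set.contains, List.contains_eq_mem, decide_eq_false_iff_not]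
    rw [pv_mem_foldl]
    rintro (hm | ⟨p, hp, hp2, hp3⟩)
    · rw [PySem.Set.mem_ofList] at hm
      simp only [List.mem_singleton] at hm
      exact h.1 hm.symm
    · rw [PySem.List.mem_enumerate_iff] at hp
      obtain ⟨k, hk, rfl⟩ := hp
      have : PySem.Chars.endswith d ('.' :: t) = true := by
        rw [pv_endswith_iff]
        refine ⟨k, hk, ?_, ?_⟩
        · simpa using hp2
        · rw [← hp3]
          have : ((0 : Int) + k + 1) = ((k + 1 : Nat) : Int) := by push_cast; ring
          rw [this, PySem.List.slice_from_natCast]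
      rw [this] at h; exact absurd h.2 (by decide)
  · simp only [PySem.Set.contains, List.contains_eq_mem, decide_eq_true_eq]
    rw [pv_mem_foldl]
    rcases Bool.or_eq_true_iff.mp h with h | h
    · exact Or.inl (by rw [PySem.Set.mem_ofList]; simp [(beq_iff_eq.mp h)])
    · rw [pv_endswith_iff] at h
      obtain ⟨k, hk, hdot, hdrop⟩ := h
      refine Or.inr ⟨((k : Int), d[k]), ?_, by simpa using hdot, ?_⟩
      · rw [PySem.List.mem_enumerate_iff]; exact ⟨k, hk, by simp⟩
      · have : ((k : Int) + 1) = ((k + 1 : Nat) : Int) := by push_cast; ring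
        rw [this, PySem.List.slice_from_natCast, hdrop]

theorem pv_loop_eq (d : List Char) (l : List String) :
    pvLoopA d l
      = l.any (fun s =>
          PySem.Set.contains
            ((PySem.List.enumerate d 0).foldl
              (fun acc p =>
                if p.2 == '.' then PySem.Set.add acc (PySem.List.slice d (some (p.1 + 1)) none)
                else acc)
              (PySem.Set.ofList [d])) (pvNormalize s)) := by
  induction l with
  | nil => simp [pvLoopA]
  | cons s rest ih =>
    rw [List.any_cons, pv_elem_eq d (pvNormalize s), ← ih]
    simp only [pvLoopA]
    split <;> simp_all

-- ===== VERDICT (by name: the statement is the Claim_ definition above) =====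
theorem domain_matches_selected_spec : Claim_equal_domain_matches_selected := by
  intro cookie_domain selected_domains _
  unfold Spec_domain_matches_selected domain_matches_selected domain_matches_selected_alt
  simp only
  split
  · rfl
  · exact pv_loop_eq (pvNormalize cookie_domain) selected_domains
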